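-- pv_equiv track=rewrite | github.com/yhyeil/Algorithms_py | counting/counting.py | max_row_values
-- ===== SOURCE A (Python) =====
-- def calculate_diff(s):
--     n = len(s)
--     differences = []
--
--     for i in range(n):
--         if s[i] == 'L':
--             differences.append(n - 1 - 2*i)
--         else:  # s[i] == 'R'
--             differences.append(-n + 1 + 2*i)
--
--     return differences
--
-- def max_row_values(s):
--     n = len(s)
--     initial_val = get_row_val(s)    #get initial row value
--     differences = calculate_diff(s)
--
--     # Sort the differences in descending order.
--     sorted_diffs = sorted(differences, reverse=True)
--     results = [initial_val]
--
--     for k in range(1, n+1):  # Change this line to run up to n-1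
--         #check if negative value -> keep the prev max
--         if sorted_diffs[k-1] >= 0:
--             results.append(results[-1] + sorted_diffs[k-1])
--         else:
--             results.append(results[-1])
--
--     return results
--
-- def get_row_val(s):
--     n = len(s)
--     value = 0
--
--     for i in range(n):
--         if s[i] == 'R':
--             value += n - i - 1
--         else:
--             value += i
--     return value
-- ===== SOURCE B (Python) =====
-- def max_row_values(s):
--     # One fused pass computes the initial value, buckets the nonnegative
--     # differences by value (counting sort), and counts the negative ones;
--     # then the results are emitted by walking the buckets in descending
--     # value order -- no comparison sort, no list indexing.
--     n = len(s)
--     init = 0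
--     cnt = {}
--     neg = 0
--     for i, c in enumerate(s):
--         init += n - i - 1 if c == 'R' else i
--         d = n - 1 - 2 * i if c == 'L' else 2 * i + 1 - n
--         if d >= 0:
--             cnt[d] = cnt.get(d, 0) + 1
--         else:
--             neg += 1
--     results = [init]
--     cur = init
--     for d in range(n - 1, -1, -1):
--         for _ in range(cnt.get(d, 0)):
--             cur += d
--             results.append(cur)
--     results.extend([cur] * neg)
--     return results
-- ===== Notes on version B (the rewrite author's own statement) =====
-- stated objective: alternative
-- what changed: Replaces the comparison sort plus indexed prefix-sum loop with one fused pass that computes the initial value, buckets the nonnegative differences by value (counting sort over the bounded range 0..n-1) and counts the negative ones, then emits the results by walking the buckets in descending order.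
import Mathlib
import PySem

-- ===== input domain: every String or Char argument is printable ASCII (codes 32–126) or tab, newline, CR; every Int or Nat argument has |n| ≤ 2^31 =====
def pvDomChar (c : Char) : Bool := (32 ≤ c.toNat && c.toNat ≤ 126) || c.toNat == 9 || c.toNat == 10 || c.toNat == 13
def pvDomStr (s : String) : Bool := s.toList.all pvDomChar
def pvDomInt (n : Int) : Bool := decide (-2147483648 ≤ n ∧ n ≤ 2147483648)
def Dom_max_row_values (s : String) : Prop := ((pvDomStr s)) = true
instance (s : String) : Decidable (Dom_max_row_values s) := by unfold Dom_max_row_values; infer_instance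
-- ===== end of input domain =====

-- B replaces A's comparison sort + indexed loop by one fused counting pass and a descending bucket walk; alternative algorithm, equal results.

-- ===== PORT A =====
def calculate_diff (s : String) : List Int :=
  let cs := s.toList
  let n : Int := PySem.List.len cs
  (PySem.List.enumerate cs).foldl
    (fun diffs ic =>
      if ic.2 = 'L' then diffs ++ [n - 1 - 2 * ic.1]
      else diffs ++ [-n + 1 + 2 * ic.1]) []

def get_row_val (s : String) : Int :=
  let cs := s.toList
  let n : Int := PySem.List.len cs
  (PySem.List.enumerate cs).foldl
    (fun v ic => if ic.2 = 'R' then v + (n - ic.1 - 1) else v + ic.1) 0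

def max_row_values (s : String) : List Int :=
  let n : Int := PySem.List.len s.toList
  let initial_val := get_row_val s
  let differences := calculate_diff s
  let sorted_diffs := PySem.List.sorted differences (fun x => x) true
  (PySem.List.pyRange 1 (n + 1) 1).foldl
    (fun results k =>
      if PySem.List.pyGetD sorted_diffs (k - 1) 0 ≥ 0 then
        results ++ [PySem.List.pyGetD results (-1) 0 + PySem.List.pyGetD sorted_diffs (k - 1) 0]
      else
        results ++ [PySem.List.pyGetD results (-1) 0])
    [initial_val]

-- ===== PORT B =====
def max_row_values_alt (s : String) : List Int :=
  let cs := s.toList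
  let n : Int := PySem.List.len cs
  let st := (PySem.List.enumerate cs).foldl
    (fun (st : Int × PySem.Dict Int Int × Int) ic =>
      let init := st.1 + (if ic.2 = 'R' then n - ic.1 - 1 else ic.1)
      let d := if ic.2 = 'L' then n - 1 - 2 * ic.1 else 2 * ic.1 + 1 - n
      if d ≥ 0 then (init, st.2.1.insert d (st.2.1.getD d 0 + 1), st.2.2)
      else (init, st.2.1, st.2.2 + 1))
    (0, PySem.Dict.empty, 0)
  let fin := (PySem.List.pyRange (n - 1) (-1) (-1)).foldl
    (fun (p : Int × List Int) d =>
      (List.range (st.2.1.getD d 0).toNat).foldl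
        (fun (q : Int × List Int) _ => (q.1 + d, q.2 ++ [q.1 + d])) p)
    (st.1, [st.1])
  fin.2 ++ List.replicate st.2.2.toNat fin.1

-- ===== PRECONDITION & SPEC =====
def Spec_max_row_values (s : String) (out : List Int) : Prop := out = max_row_values_alt s
instance (s : String) (out : List Int) : Decidable (Spec_max_row_values s out) := by unfold Spec_max_row_values; infer_instance

-- ===== CLAIM (what is proved, stated in full; the proofs are below) =====
def Claim_equal_max_row_values : Prop := ∀ (s : String), Dom_max_row_values s → Spec_max_row_values s (max_row_values s)

-- ===== LEMMAS AND PROOFS =====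

-- helper values: pvF clamps a difference to its contribution, pvScan emits running sums,
-- pvEnd is the final running sum, pvG/pvH are the per-index difference / initial-value terms,
-- pvDesc k = [k-1, …, 0], pvFlat expands counting buckets.
def pvF (d : Int) : Int := if d ≥ 0 then d else 0

def pvScan (c : Int) : List Int → List Int
  | [] => []
  | d :: t => (c + d) :: pvScan (c + d) t

def pvEnd (c : Int) (l : List Int) : Int := l.foldl (· + ·) c

def pvG (n : Int) (ic : Int × Char) : Int :=
  if ic.2 = 'L' then n - 1 - 2 * ic.1 else -n + 1 + 2 * ic.1

def pvH (n : Int) (ic : Int × Char) : Int :=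
  if ic.2 = 'R' then n - ic.1 - 1 else ic.1

def pvDesc (k : Nat) : List Int := (List.range k).map (fun j : Nat => (k : Int) - 1 - (j : Int))

def pvFlat (cnt : Int → Nat) (D : List Int) : List Int :=
  D.flatMap (fun d => List.replicate (cnt d) d)

theorem pvScan_cons (c d : Int) (t : List Int) :
    pvScan c (d :: t) = (c + d) :: pvScan (c + d) t := rfl

theorem pvEnd_append (c : Int) (l1 l2 : List Int) :
    pvEnd c (l1 ++ l2) = pvEnd (pvEnd c l1) l2 := by
  simp [pvEnd, List.foldl_append]

theorem pvScan_append (l1 : List Int) : ∀ (l2 : List Int) (c : Int),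
    pvScan c (l1 ++ l2) = pvScan c l1 ++ pvScan (pvEnd c l1) l2 := by
  induction l1 with
  | nil => intro l2 c; simp [pvScan, pvEnd]
  | cons d t ih =>
    intro l2 c
    simp only [List.cons_append, pvScan_cons, ih]
    have : pvEnd c (d :: t) = pvEnd (c + d) t := by simp [pvEnd]
    rw [this]

theorem pvScan_replicate_zero (m : Nat) : ∀ c : Int,
    pvScan c (List.replicate m 0) = List.replicate m c := by
  induction m with
  | zero => intro c; simp [pvScan]
  | succ k ih => intro c; simp [List.replicate_succ, pvScan_cons, ih]

-- ===== A-side characterisation =====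

theorem pvShift (b : Int) (g : List Int → Int → List Int) (i : List Int) :
    (PySem.List.pyRange 1 (b + 1) 1).foldl (fun r k => g r (k - 1)) i
      = (PySem.List.pyRange 0 b 1).foldl g i := by
  rw [PySem.List.pyRange_one, PySem.List.pyRange_one, List.foldl_map, List.foldl_map]
  have hb : (b + 1 - 1) = b - 0 := by ring
  rw [hb]
  congr 1
  funext r k
  have : (1 : Int) + (k : Int) - 1 = 0 + (k : Int) := by ring
  rw [this]

theorem pvALoop (l : List Int) : ∀ (pre : List Int) (c : Int),
    l.foldl (fun results v =>
        if v ≥ 0 then results ++ [PySem.List.pyGetD results (-1) 0 + v]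
        else results ++ [PySem.List.pyGetD results (-1) 0]) (pre ++ [c])
      = pre ++ c :: pvScan c (l.map pvF) := by
  induction l with
  | nil => intro pre c; simp [pvScan]
  | cons d t ih =>
    intro pre c
    simp only [List.foldl_cons, List.map_cons]
    by_cases h : d ≥ 0
    · rw [if_pos h, PySem.List.pyGetD_neg_one_append_singleton, ih (pre ++ [c]) (c + d)]
      have hf : pvF d = d := by simp [pvF, h]
      simp [pvScan_cons, hf]
    · rw [if_neg h, PySem.List.pyGetD_neg_one_append_singleton, ih (pre ++ [c]) c]
      have hf : pvF d = 0 := by simp [pvF, h]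
      simp [pvScan_cons, hf]

theorem pvDiffsEq (s : String) :
    calculate_diff s
      = (PySem.List.enumerate s.toList).map (pvG (s.toList.length : Int)) := by
  unfold calculate_diff
  simp only [PySem.List.len_eq]
  have h : (fun (diffs : List Int) (ic : Int × Char) =>
      if ic.2 = 'L' then diffs ++ [((s.toList.length : Int)) - 1 - 2 * ic.1]
      else diffs ++ [-(s.toList.length : Int) + 1 + 2 * ic.1])
      = fun (diffs : List Int) ic => diffs ++ [pvG (s.toList.length : Int) ic] := by
    funext diffs ic; unfold pvG; split <;> rfl
  rw [h, PySem.List.foldl_append_singleton_eq_map]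
  simp

theorem pvGrvEq (s : String) :
    get_row_val s = ((PySem.List.enumerate s.toList).map (pvH (s.toList.length : Int))).sum := by
  unfold get_row_val
  simp only [PySem.List.len_eq]
  have h : (fun (v : Int) (ic : Int × Char) =>
      if ic.2 = 'R' then v + ((s.toList.length : Int) - ic.1 - 1) else v + ic.1)
      = fun (v : Int) ic => v + pvH (s.toList.length : Int) ic := by
    funext v ic; unfold pvH; split <;> rfl
  rw [h, PySem.List.foldl_add]
  simp

theorem pvAChar (s : String) :
    max_row_values s
      = get_row_val s ::
        pvScan (get_row_val s)
          ((PySem.List.sorted (calculate_diff s) (fun x => x) true).map pvF) := by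
  unfold max_row_values
  simp only [PySem.List.len_eq]
  have hlen : (s.toList.length : Int)
      = ((PySem.List.sorted (calculate_diff s) (fun x => x) true).length : Int) := by
    rw [PySem.List.length_sorted, pvDiffsEq]
    simp [PySem.List.length_enumerate]
  rw [hlen]
  rw [pvShift ((PySem.List.sorted (calculate_diff s) (fun x => x) true).length : Int)
      (fun r j =>
        if PySem.List.pyGetD (PySem.List.sorted (calculate_diff s) (fun x => x) true) j 0 ≥ 0 then
          r ++ [PySem.List.pyGetD r (-1) 0 +
            PySem.List.pyGetD (PySem.List.sorted (calculate_diff s) (fun x => x) true) j 0]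
        else r ++ [PySem.List.pyGetD r (-1) 0])]
  rw [PySem.List.foldl_pyRange_zero_pyGetD'
      (PySem.List.sorted (calculate_diff s) (fun x => x) true) 0
      (fun results v =>
        if v ≥ 0 then results ++ [PySem.List.pyGetD results (-1) 0 + v]
        else results ++ [PySem.List.pyGetD results (-1) 0])]
  have := pvALoop ((PySem.List.sorted (calculate_diff s) (fun x => x) true)) [] (get_row_val s)
  simpa using this

-- ===== B-side characterisation =====

def pvStep (n : Int) (st : Int × PySem.Dict Int Int × Int) (ic : Int × Char) :
    Int × PySem.Dict Int Int × Int :=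
  let init := st.1 + (if ic.2 = 'R' then n - ic.1 - 1 else ic.1)
  let d := if ic.2 = 'L' then n - 1 - 2 * ic.1 else 2 * ic.1 + 1 - n
  if d ≥ 0 then (init, st.2.1.insert d (st.2.1.getD d 0 + 1), st.2.2)
  else (init, st.2.1, st.2.2 + 1)

theorem pvBPass (n : Int) : ∀ (l : List (Int × Char)) (a : Int) (dct : PySem.Dict Int Int) (m : Int),
    (l.foldl (pvStep n) (a, dct, m)).1 = a + (l.map (pvH n)).sum
    ∧ (∀ v : Int, (l.foldl (pvStep n) (a, dct, m)).2.1.getD v 0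
        = dct.getD v 0 + (((l.map (pvG n)).filter (fun d => decide (0 ≤ d))).count v : Int))
    ∧ (l.foldl (pvStep n) (a, dct, m)).2.2
        = m + ((l.map (pvG n)).countP (fun d => decide (d < 0)) : Int) := by
  intro l
  induction l with
  | nil => intro a dct m; simp
  | cons ic t ih =>
    intro a dct m
    obtain ⟨i, c⟩ := ic
    have hd : (if c = 'L' then n - 1 - 2 * i else 2 * i + 1 - n) = pvG n (i, c) := by
      unfold pvG; split <;> ring
    have hh : (if c = 'R' then n - i - 1 else i) = pvH n (i, c) := by
      unfold pvH; split <;> rfl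
    simp only [List.foldl_cons, pvStep, hd, hh]
    by_cases hge : pvG n (i, c) ≥ 0
    · rw [if_pos hge]
      obtain ⟨ih1, ih2, ih3⟩ := ih (a + pvH n (i, c))
        (dct.insert (pvG n (i, c)) (dct.getD (pvG n (i, c)) 0 + 1)) m
      refine ⟨?_, ?_, ?_⟩
      · rw [ih1]; simp [List.sum_cons]; ring
      · intro v
        rw [ih2 v, PySem.Dict.getD_insert]
        simp only [List.map_cons, List.filter_cons, hge, decide_true]
        by_cases hv : v = pvG n (i, c)
        · simp [hv]; ring
        · simp [hv, Ne.symm hv]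
      · rw [ih3]
        have h2 : ¬ pvG n (i, c) < 0 := by omega
        simp [h2]
    · rw [if_neg hge]
      obtain ⟨ih1, ih2, ih3⟩ := ih (a + pvH n (i, c)) dct (m + 1)
      refine ⟨?_, ?_, ?_⟩
      · rw [ih1]; simp [List.sum_cons]; ring
      · intro v
        rw [ih2 v]
        simp only [List.map_cons, List.filter_cons]
        simp [hge]
      · rw [ih3]
        have h2 : pvG n (i, c) < 0 := by omega
        simp only [List.map_cons, List.countP_cons, h2, decide_true]
        push_cast
        ring

theorem pvInner (d : Int) : ∀ (m : Nat) (c : Int) (res : List Int),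
    (List.range m).foldl (fun (q : Int × List Int) _ => (q.1 + d, q.2 ++ [q.1 + d])) (c, res)
      = (pvEnd c (List.replicate m d), res ++ pvScan c (List.replicate m d)) := by
  intro m
  induction m with
  | zero => intro c res; simp [pvEnd, pvScan]
  | succ m ih =>
    intro c res
    rw [List.range_succ, List.foldl_append, ih c res]
    have hr : List.replicate (m + 1) d = List.replicate m d ++ [d] := List.replicate_succ' ..
    rw [hr, pvEnd_append, pvScan_append]
    simp [pvEnd, pvScan]

theorem pvOuter (cnt : Int → Nat) : ∀ (D : List Int) (c : Int) (res : List Int),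
    D.foldl (fun (p : Int × List Int) d =>
        (List.range (cnt d)).foldl (fun (q : Int × List Int) _ => (q.1 + d, q.2 ++ [q.1 + d])) p)
      (c, res)
      = (pvEnd c (pvFlat cnt D), res ++ pvScan c (pvFlat cnt D)) := by
  intro D
  induction D with
  | nil => intro c res; simp [pvFlat, pvEnd, pvScan]
  | cons d t ih =>
    intro c res
    simp only [List.foldl_cons]
    rw [pvInner d (cnt d) c res, ih]
    unfold pvFlat
    rw [List.flatMap_cons, pvEnd_append, pvScan_append, List.append_assoc]

-- ===== the counting/bucket list is the descending sort =====

theorem pvMapFPerm : ∀ (l : List Int),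
    (l.map pvF).Perm
      (l.filter (fun d => decide (0 ≤ d))
        ++ List.replicate (l.countP (fun d => decide (d < 0))) 0) := by
  intro l
  induction l with
  | nil => simp
  | cons d t ih =>
    by_cases h : 0 ≤ d
    · have hf : pvF d = d := if_pos h
      have h2 : ¬ d < 0 := by omega
      simp only [List.map_cons, List.filter_cons, List.countP_cons, hf, h, h2,
        decide_true, decide_false, if_true, List.cons_append]
      exact ih.cons d
    · have hf : pvF d = 0 := if_neg h
      have h2 : d < 0 := by omega
      simp only [List.map_cons, List.filter_cons, List.countP_cons, hf, h, h2,
        decide_true, decide_false, List.replicate_succ]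
      exact (ih.cons 0).trans List.perm_middle.symm

theorem pvDescSucc (k : Nat) : pvDesc (k + 1) = (k : Int) :: pvDesc k := by
  unfold pvDesc
  rw [List.range_succ_eq_map]
  refine List.cons_eq_cons.mpr ⟨by push_cast; ring, ?_⟩
  rw [List.map_map]
  apply List.map_congr_left
  intro j hj
  simp only [Function.comp]
  push_cast; ring

theorem pvMemDesc {k : Nat} {x : Int} (hx : x ∈ pvDesc k) : 0 ≤ x ∧ x < (k : Int) := by
  unfold pvDesc at hx
  obtain ⟨j, hj, rfl⟩ := List.mem_map.mp hx
  have := List.mem_range.mp hj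
  omega

theorem pvCountFlatPerm : ∀ (k : Nat) (P : List Int), (∀ d ∈ P, 0 ≤ d ∧ d < (k : Int)) →
    (pvFlat (fun d => P.count d) (pvDesc k)).Perm P := by
  intro k
  induction k with
  | zero =>
    intro P h
    have hP : P = [] := by
      cases P with
      | nil => rfl
      | cons x xs => exact absurd (h x (List.mem_cons_self ..)) (by push_cast; omega)
    simp [hP, pvDesc, pvFlat]
  | succ k ih =>
    intro P h
    rw [pvDescSucc]
    unfold pvFlat
    rw [List.flatMap_cons]
    have hcnt : ∀ d ∈ pvDesc k,
        P.count d = (P.filter (fun x => !(x == (k : Int)))).count d := by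
      intro d hd
      have hdk : d ≠ (k : Int) := by have := pvMemDesc hd; omega
      rw [List.count_filter]
      simp [hdk]
    have hflat : (pvDesc k).flatMap (fun d => List.replicate (P.count d) d)
        = (pvDesc k).flatMap
            (fun d => List.replicate ((P.filter (fun x => !(x == (k : Int)))).count d) d) := by
      rw [List.flatMap_def, List.flatMap_def]
      exact congrArg List.flatten (List.map_congr_left (fun d hd => by rw [hcnt d hd]))
    rw [hflat]
    have hPb : ∀ d ∈ P.filter (fun x => !(x == (k : Int))), 0 ≤ d ∧ d < (k : Int) := by
      intro d hd
      have hm := List.mem_filter.mp hd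
      have h1 := h d hm.1
      have h2 : d ≠ (k : Int) := by
        intro he; rw [he] at hm; simp at hm
      push_cast at h1 ⊢
      omega
    have hperm := ih (P.filter (fun x => !(x == (k : Int)))) hPb
    have hsplit : (List.replicate (P.count (k : Int)) (k : Int)
        ++ P.filter (fun x => !(x == (k : Int)))).Perm P := by
      have h0 := List.filter_append_perm (fun x => x == (k : Int)) P
      rwa [List.filter_beq] at h0
    exact (hperm.append_left _).trans hsplit

theorem pvDescPairwise (k : Nat) : (pvDesc k).Pairwise (· ≥ ·) := by
  unfold pvDesc
  exact List.Pairwise.map _ (fun a b hab => by omega) List.pairwise_lt_range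

theorem pvFlatPairwise (cnt : Int → Nat) : ∀ D : List Int,
    D.Pairwise (· ≥ ·) → (pvFlat cnt D).Pairwise (· ≥ ·) := by
  intro D
  induction D with
  | nil => intro _; simp [pvFlat]
  | cons d t ih =>
    intro hp
    rw [List.pairwise_cons] at hp
    unfold pvFlat
    rw [List.flatMap_cons, List.pairwise_append]
    refine ⟨?_, ih hp.2, ?_⟩
    · rw [List.pairwise_replicate]; right; exact le_refl d
    · intro x hx y hy
      have hxd : x = d := List.eq_of_mem_replicate hx
      obtain ⟨d', hd', hy'⟩ := List.mem_flatMap.mp hy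
      have hyd : y = d' := List.eq_of_mem_replicate hy'
      rw [hxd, hyd]
      exact hp.1 d' hd'

theorem pvSortedMapF (xs : List Int) :
    ((PySem.List.sorted xs (fun x => x) true).map pvF).Pairwise (· ≥ ·) :=
  List.Pairwise.map _ (fun a b h => by unfold pvF; split_ifs <;> omega)
    (PySem.List.sorted_pairwise_rev xs (fun x => x))

theorem pvMainEq (xs : List Int) (k : Nat) (hb : ∀ d ∈ xs, d < (k : Int)) :
    (PySem.List.sorted xs (fun x => x) true).map pvF
      = pvFlat (fun d => (xs.filter (fun d => decide (0 ≤ d))).count d) (pvDesc k)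
        ++ List.replicate (xs.countP (fun d => decide (d < 0))) 0 := by
  apply List.eq_of_perm_of_sorted (le := (· ≥ ·))
  · intro a b _ _ h1 h2; omega
  · exact pvSortedMapF xs
  · rw [List.pairwise_append]
    refine ⟨pvFlatPairwise _ _ (pvDescPairwise k), ?_, ?_⟩
    · rw [List.pairwise_replicate]; right; exact le_refl (0 : Int)
    · intro x hx y hy
      obtain ⟨d', hd', hx'⟩ := List.mem_flatMap.mp hx
      have hxd : x = d' := List.eq_of_mem_replicate hx'
      have hy0 : y = 0 := List.eq_of_mem_replicate hy
      have := pvMemDesc hd'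
      rw [hxd, hy0]; omega
  · have h1 : ((PySem.List.sorted xs (fun x => x) true).map pvF).Perm (xs.map pvF) :=
      (PySem.List.sorted_perm xs (fun x => x) true).map pvF
    have h2 := pvMapFPerm xs
    have hbP : ∀ d ∈ xs.filter (fun d => decide (0 ≤ d)), 0 ≤ d ∧ d < (k : Int) := by
      intro d hd
      have hm := List.mem_filter.mp hd
      have := hb d hm.1
      have hge : d ≥ 0 := by simpa using hm.2
      omega
    have h3 := pvCountFlatPerm k (xs.filter (fun d => decide (0 ≤ d))) hbP
    exact h1.trans (h2.trans ((h3.append_right _).symm))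

theorem pvDiffsLt (s : String) : ∀ d ∈ calculate_diff s, d < (s.toList.length : Int) := by
  rw [pvDiffsEq]
  intro d hd
  obtain ⟨ic, hic, rfl⟩ := List.mem_map.mp hd
  obtain ⟨j, hj, rfl⟩ := (PySem.List.mem_enumerate_iff _ _ _).mp hic
  unfold pvG
  split <;> (push_cast; omega)

theorem pvPyRangeDesc (N : Nat) : PySem.List.pyRange ((N : Int) - 1) (-1) (-1) = pvDesc N := by
  rw [PySem.List.pyRange_neg_one]
  unfold pvDesc
  have h1 : ((N : Int) - 1 - (-1)).toNat = N := by omega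
  rw [h1]

-- ===== assembly =====

theorem pvBChar (s : String) :
    max_row_values_alt s
      = (get_row_val s ::
          pvScan (get_row_val s)
            (pvFlat (fun d => ((calculate_diff s).filter (fun d => decide (0 ≤ d))).count d)
              (pvDesc s.toList.length)))
        ++ List.replicate ((calculate_diff s).countP (fun d => decide (d < 0)))
            (pvEnd (get_row_val s)
              (pvFlat (fun d => ((calculate_diff s).filter (fun d => decide (0 ≤ d))).count d)
                (pvDesc s.toList.length))) := by
  obtain ⟨h1, h2, h3⟩ := pvBPass (s.toList.length : Int) (PySem.List.enumerate s.toList)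
    0 PySem.Dict.empty 0
  set T := (PySem.List.enumerate s.toList).foldl (pvStep (s.toList.length : Int))
    (0, PySem.Dict.empty, 0) with hT
  have hdef : max_row_values_alt s =
      ((PySem.List.pyRange ((s.toList.length : Int) - 1) (-1) (-1)).foldl
          (fun (p : Int × List Int) d =>
            (List.range (T.2.1.getD d 0).toNat).foldl
              (fun (q : Int × List Int) _ => (q.1 + d, q.2 ++ [q.1 + d])) p)
          (T.1, [T.1])).2
        ++ List.replicate T.2.2.toNat
          ((PySem.List.pyRange ((s.toList.length : Int) - 1) (-1) (-1)).foldl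
            (fun (p : Int × List Int) d =>
              (List.range (T.2.1.getD d 0).toNat).foldl
                (fun (q : Int × List Int) _ => (q.1 + d, q.2 ++ [q.1 + d])) p)
            (T.1, [T.1])).1 := rfl
  rw [hdef, pvPyRangeDesc,
    pvOuter (fun d => (T.2.1.getD d 0).toNat) (pvDesc s.toList.length) T.1 [T.1]]
  have hcnt : (fun d => (T.2.1.getD d 0).toNat)
      = fun d => ((calculate_diff s).filter (fun d => decide (0 ≤ d))).count d := by
    funext v
    rw [h2 v, ← pvDiffsEq]
    simp [pysem]
  have hT1 : T.1 = get_row_val s := by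
    rw [h1, pvGrvEq]; simp
  have hT3 : T.2.2.toNat = (calculate_diff s).countP (fun d => decide (d < 0)) := by
    rw [h3, ← pvDiffsEq]; simp
  rw [hcnt, hT1, hT3]
  simp

-- ===== VERDICT (by name: the statement is the Claim_ definition above) =====
theorem max_row_values_spec : Claim_equal_max_row_values := by
  intro s _
  unfold Spec_max_row_values
  rw [pvAChar s, pvBChar s,
    pvMainEq (calculate_diff s) s.toList.length (pvDiffsLt s),
    pvScan_append, pvScan_replicate_zero]
  simp
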